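-- pv_equiv track=rewrite | github.com/RosZki/CAILS | brain/interpreter.py | combine_similar
-- ===== SOURCE A (Python) =====
-- def combine_similar(input, tags):
--     output = []
--     curr = []
--     tag = ""
--     for x in input:
--         if x[1] not in tags:
--             if len(curr) > 0:
--                 output.append((" ".join([x[0] for x in curr]), tag))
--                 curr[:] = []
--                 tag = ""
--             output.append(x)
--         elif x[1] == tag:
--             curr.append(x)
--         else:
--             if len(curr) > 0:
--                 output.append((" ".join([x[0] for x in curr]), tag))
--                 curr[:] = []
--             tag = x[1]
--             curr.append(x)
--     if len(curr) > 0: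
--         output.append((" ".join([x[0] for x in curr]), tag))
--     return output
-- ===== SOURCE B (Python) =====
-- def combine_similar(input, tags):
--     # Run-scanning re-implementation: find each maximal run of equal mergeable
--     # tags with an inner scan, emit one merged pair per run; untagged items
--     # pass through one by one. No flush/accumulator state.
--     res = []
--     i = 0
--     n = len(input)
--     while i < n:
--         t = input[i][1]
--         if t in tags:
--             j = i + 1
--             while j < n and input[j][1] == t:
--                 j += 1
--             res.append((" ".join(x[0] for x in input[i:j]), t))
--             i = j
--         else:
--             res.append(input[i])
--             i += 1
--     return res
-- ===== Notes on version B (the rewrite author's own statement) =====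
-- stated objective: alternative
-- what changed: Replaced the stateful flush/accumulator loop (curr buffer, pending tag, three flush sites) with an index-based run scanner: an inner scan finds each maximal run of equal mergeable tags and emits one merged pair directly, untagged items pass through one by one.
import Mathlib
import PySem

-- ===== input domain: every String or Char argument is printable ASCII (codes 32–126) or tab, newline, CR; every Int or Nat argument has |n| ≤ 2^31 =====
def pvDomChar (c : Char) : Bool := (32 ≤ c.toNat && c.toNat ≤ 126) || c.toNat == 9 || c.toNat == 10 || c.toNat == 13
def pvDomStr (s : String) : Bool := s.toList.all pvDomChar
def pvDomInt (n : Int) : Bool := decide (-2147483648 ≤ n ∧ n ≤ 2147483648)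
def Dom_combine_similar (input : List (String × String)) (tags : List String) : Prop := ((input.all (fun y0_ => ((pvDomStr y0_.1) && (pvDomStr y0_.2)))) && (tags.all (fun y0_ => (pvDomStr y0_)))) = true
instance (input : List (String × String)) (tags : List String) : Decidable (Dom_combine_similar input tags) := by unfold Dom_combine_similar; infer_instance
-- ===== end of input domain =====

-- B replaces A's stateful flush/accumulator loop by an index-free run scanner
-- (take each maximal run of one mergeable tag, emit one merged pair): alternative
-- decomposition, same cost.


-- ===== PORT A =====
-- loop body of A's for-loop; state = (output, curr, tag)
def pvStepA (tags : List String)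
    (st : List (String × String) × List (String × String) × String)
    (x : String × String) :
    List (String × String) × List (String × String) × String :=
  match st with
  | (output, curr, tag) =>
    if x.2 ∉ tags then
      if curr.length > 0 then
        (output ++ [(PySem.Str.join " " (curr.map (·.1)), tag)] ++ [x], [], "")
      else
        (output ++ [x], curr, tag)
    else if x.2 = tag then
      (output, curr ++ [x], tag)
    else
      if curr.length > 0 then
        (output ++ [(PySem.Str.join " " (curr.map (·.1)), tag)], [x], x.2)
      else
        (output, [x], x.2)

def combine_similar (input : List (String × String)) (tags : List String) : List (String × String) :=
  let s := input.foldl (pvStepA tags) ([], [], "")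
  if s.2.1.length > 0 then
    s.1 ++ [(PySem.Str.join " " (s.2.1.map (·.1)), s.2.2)]
  else s.1

-- ===== PORT B =====
-- Source B's run scanner: the inner `while j < n and input[j][1] == t` scan over the
-- elements after position i is exactly takeWhile/dropWhile on the tail.
def pvGoB (tags : List String) : List (String × String) → List (String × String)
  | [] => []
  | x :: rest =>
    if x.2 ∈ tags then
      (PySem.Str.join " " ((x :: rest.takeWhile (fun y => y.2 == x.2)).map (·.1)), x.2)
        :: pvGoB tags (rest.dropWhile (fun y => y.2 == x.2))
    else
      x :: pvGoB tags rest
  termination_by l => l.length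
  decreasing_by
  · have := List.length_dropWhile_le (fun y => y.2 == x.2) rest
    simp; omega
  · simp

def combine_similar_alt (input : List (String × String)) (tags : List String) : List (String × String) :=
  pvGoB tags input

-- ===== PRECONDITION & SPEC =====
def Spec_combine_similar (input : List (String × String)) (tags : List String) (out : List (String × String)) : Prop := out = combine_similar_alt input tags
instance (input : List (String × String)) (tags : List String) (out : List (String × String)) : Decidable (Spec_combine_similar input tags out) := by unfold Spec_combine_similar; infer_instance

-- ===== CLAIM (what is proved, stated in full; the proofs are below) =====
def Claim_equal_combine_similar : Prop := ∀ (input : List (String × String)) (tags : List String), Dom_combine_similar input tags → Spec_combine_similar input tags (combine_similar input tags)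

-- ===== LEMMAS AND PROOFS =====

-- A's loop-plus-final-flush, generalized over the starting state.
def pvRunA (tags : List String) (out curr : List (String × String)) (tag : String)
    (l : List (String × String)) : List (String × String) :=
  let s := l.foldl (pvStepA tags) (out, curr, tag)
  if s.2.1.length > 0 then
    s.1 ++ [(PySem.Str.join " " (s.2.1.map (·.1)), s.2.2)]
  else s.1

theorem runA_cons (tags : List String) (out curr : List (String × String)) (tag : String)
    (x : String × String) (l : List (String × String)) :
    pvRunA tags out curr tag (x :: l)
      = pvRunA tags (pvStepA tags (out, curr, tag) x).1
          (pvStepA tags (out, curr, tag) x).2.1 (pvStepA tags (out, curr, tag) x).2.2 l := rfl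

theorem stepA_out_nil (tags : List String) (out : List (String × String)) (tag : String)
    (x : String × String) (hm : x.2 ∉ tags) :
    pvStepA tags (out, [], tag) x = (out ++ [x], [], tag) := by
  simp [pvStepA, hm]

theorem stepA_out_cons (tags : List String) (out : List (String × String))
    (c : String × String) (cs : List (String × String)) (tag : String)
    (x : String × String) (hm : x.2 ∉ tags) :
    pvStepA tags (out, c :: cs, tag) x
      = (out ++ [(PySem.Str.join " " ((c :: cs).map (·.1)), tag)] ++ [x], [], "") := by
  simp [pvStepA, hm]

theorem stepA_eq (tags : List String) (out curr : List (String × String)) (tag : String)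
    (x : String × String) (hm : x.2 ∈ tags) (he : x.2 = tag) :
    pvStepA tags (out, curr, tag) x = (out, curr ++ [x], tag) := by
  subst he; simp [pvStepA, hm]

theorem stepA_new_nil (tags : List String) (out : List (String × String)) (tag : String)
    (x : String × String) (hm : x.2 ∈ tags) (he : x.2 ≠ tag) :
    pvStepA tags (out, [], tag) x = (out, [x], x.2) := by
  simp [pvStepA, hm, he]

theorem stepA_new_cons (tags : List String) (out : List (String × String))
    (c : String × String) (cs : List (String × String)) (tag : String)
    (x : String × String) (hm : x.2 ∈ tags) (he : x.2 ≠ tag) :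
    pvStepA tags (out, c :: cs, tag) x
      = (out ++ [(PySem.Str.join " " ((c :: cs).map (·.1)), tag)], [x], x.2) := by
  simp [pvStepA, hm, he]

theorem takeWhile_append_all {α : Type} (p : α → Bool) (xs ys : List α)
    (h : ∀ a ∈ xs, p a = true) :
    (xs ++ ys).takeWhile p = xs ++ ys.takeWhile p := by
  induction xs with
  | nil => simp
  | cons a xs ih =>
    simp only [List.cons_append, List.takeWhile_cons, h a (by simp)]
    simp [ih (fun b hb => h b (by simp [hb]))]

theorem dropWhile_append_all {α : Type} (p : α → Bool) (xs ys : List α)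
    (h : ∀ a ∈ xs, p a = true) :
    (xs ++ ys).dropWhile p = ys.dropWhile p := by
  induction xs with
  | nil => simp
  | cons a xs ih =>
    simp only [List.cons_append, List.dropWhile_cons, h a (by simp)]
    simp [ih (fun b hb => h b (by simp [hb]))]

theorem goB_cons_notmem (tags : List String) (x : String × String)
    (l : List (String × String)) (hm : x.2 ∉ tags) :
    pvGoB tags (x :: l) = x :: pvGoB tags l := by
  rw [pvGoB.eq_def]; simp [hm]

-- pvGoB on a nonempty block of one mergeable tag followed by l
theorem goB_group (tags : List String) (c : String × String)
    (cs l : List (String × String)) (hm : c.2 ∈ tags) (hcs : ∀ a ∈ cs, a.2 = c.2) :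
    pvGoB tags ((c :: cs) ++ l)
      = (PySem.Str.join " " ((c :: (cs ++ l.takeWhile (fun y => y.2 == c.2))).map (·.1)), c.2)
        :: pvGoB tags (l.dropWhile (fun y => y.2 == c.2)) := by
  have hb : ∀ a ∈ cs, (fun y : String × String => y.2 == c.2) a = true := by
    intro a ha; simp [hcs a ha]
  rw [List.cons_append, pvGoB.eq_def]
  simp [hm, takeWhile_append_all _ _ _ hb, dropWhile_append_all _ _ _ hb]

theorem pvMain (tags : List String) (l : List (String × String)) :
    (∀ out tag, pvRunA tags out [] tag l = out ++ pvGoB tags l) ∧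
    (∀ out curr tag, curr ≠ [] → tag ∈ tags → (∀ c ∈ curr, c.2 = tag) →
      pvRunA tags out curr tag l = out ++ pvGoB tags (curr ++ l)) := by
  induction l with
  | nil =>
    constructor
    · intro out tag; simp [pvRunA, pvGoB]
    · intro out curr tag hne htg hall
      obtain ⟨c, cs, rfl⟩ := List.exists_cons_of_ne_nil hne
      have hc : c.2 = tag := hall c (by simp)
      subst hc
      have hcs : ∀ a ∈ cs, a.2 = c.2 := fun a ha => hall a (by simp [ha])
      rw [goB_group tags c cs [] htg hcs]
      simp [pvRunA, pvGoB]
  | cons x rest ih =>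
    constructor
    · intro out tag
      by_cases hm : x.2 ∈ tags
      · by_cases he : x.2 = tag
        · rw [runA_cons, stepA_eq tags out [] tag x hm he]
          simp only [List.nil_append]
          rw [ih.2 out [x] tag (by simp) (he ▸ hm) (by simp [he])]
          simp
        · rw [runA_cons, stepA_new_nil tags out tag x hm he]
          rw [ih.2 out [x] x.2 (by simp) hm (by simp)]
          simp
      · rw [runA_cons, stepA_out_nil tags out tag x hm]
        rw [ih.1 (out ++ [x]) tag, goB_cons_notmem tags x rest hm]
        simp
    · intro out curr tag hne htg hall
      obtain ⟨c, cs, rfl⟩ := List.exists_cons_of_ne_nil hne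
      have hc : c.2 = tag := hall c (by simp)
      subst hc
      have hcs : ∀ a ∈ cs, a.2 = c.2 := fun a ha => hall a (by simp [ha])
      by_cases hm : x.2 ∈ tags
      · by_cases he : x.2 = c.2
        · rw [runA_cons, stepA_eq tags out (c :: cs) c.2 x hm he]
          have : (c :: cs) ++ [x] = c :: (cs ++ [x]) := by simp
          rw [this, ih.2 out (c :: (cs ++ [x])) c.2 (by simp) htg
            (by intro a ha
                rcases (by simpa using ha) with h | h | h
                · simp [h]
                · exact hcs a (by simp [h])
                · simp [h, he])]
          simp
        · have hx : (x.2 == c.2) = false := by simp [he]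
          rw [runA_cons, stepA_new_cons tags out c cs c.2 x hm he]
          rw [ih.2 _ [x] x.2 (by simp) hm (by simp)]
          rw [goB_group tags c cs (x :: rest) htg hcs]
          simp [hx]
      · have hx : (x.2 == c.2) = false := by
          simp only [beq_eq_false_iff_ne, ne_eq]
          intro h; exact hm (h ▸ htg)
        rw [runA_cons, stepA_out_cons tags out c cs c.2 x hm]
        rw [ih.1 _ ""]
        rw [goB_group tags c cs (x :: rest) htg hcs]
        simp [hx, goB_cons_notmem tags x rest hm]

-- ===== VERDICT (by name: the statement is the Claim_ definition above) =====
theorem combine_similar_spec : Claim_equal_combine_similar := by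
  intro input tags _
  show combine_similar input tags = combine_similar_alt input tags
  have h := (pvMain tags input).1 [] ""
  simpa [pvRunA, combine_similar, combine_similar_alt] using h
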